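-- pv_equiv track=rewrite | github.com/Klasa-2h/VPlotter | src_stare/generator_krokow_silnikow.py | polacz_kroki
-- ===== SOURCE A (Python) =====
-- def polacz_kroki(kroki_prawy_f, kroki_lewy_f, rodzaj_prawego, rodzaj_lewego):
--     polaczone = []
--     laczna_dlugosc = kroki_prawy_f + kroki_lewy_f
--     interwal = kroki_lewy_f / kroki_prawy_f
--
--     indeks_prawy = 0
--     indeks_lewy = 0
--
--     for i in range(laczna_dlugosc):
--         if indeks_lewy < round(indeks_prawy * interwal) and indeks_lewy < kroki_lewy_f:
--             polaczone.append(rodzaj_lewego)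
--             indeks_lewy += 1
--         elif indeks_prawy < kroki_prawy_f:
--             polaczone.append(rodzaj_prawego)
--             indeks_prawy += 1
--
--     while indeks_prawy < kroki_prawy_f:
--         polaczone.append(rodzaj_prawego)
--         indeks_prawy += 1
--     while indeks_lewy < kroki_lewy_f:
--         polaczone.append(rodzaj_lewego)
--         indeks_lewy += 1
--
--     return polaczone
-- ===== SOURCE B (Python) =====
-- def polacz_kroki(kroki_prawy_f, kroki_lewy_f, rodzaj_prawego, rodzaj_lewego):
--     interwal = kroki_lewy_f / kroki_prawy_f
--     polaczone = []
--     lewy = 0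
--     for p in range(kroki_prawy_f):
--         while lewy < round(p * interwal) and lewy < kroki_lewy_f:
--             polaczone.append(rodzaj_lewego)
--             lewy += 1
--         polaczone.append(rodzaj_prawego)
--     while lewy < kroki_lewy_f:
--         polaczone.append(rodzaj_lewego)
--         lewy += 1
--     return polaczone
-- ===== Notes on version B (the rewrite author's own statement) =====
-- stated objective: alternative
-- what changed: Replaces A's flat fuel-driven state machine over range(L+R) plus two trailing flush loops with a nested decomposition: an outer loop over the right-motor steps, an inner while emitting the proportional left steps before each right step, and a single final left flush.
import Mathlib
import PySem

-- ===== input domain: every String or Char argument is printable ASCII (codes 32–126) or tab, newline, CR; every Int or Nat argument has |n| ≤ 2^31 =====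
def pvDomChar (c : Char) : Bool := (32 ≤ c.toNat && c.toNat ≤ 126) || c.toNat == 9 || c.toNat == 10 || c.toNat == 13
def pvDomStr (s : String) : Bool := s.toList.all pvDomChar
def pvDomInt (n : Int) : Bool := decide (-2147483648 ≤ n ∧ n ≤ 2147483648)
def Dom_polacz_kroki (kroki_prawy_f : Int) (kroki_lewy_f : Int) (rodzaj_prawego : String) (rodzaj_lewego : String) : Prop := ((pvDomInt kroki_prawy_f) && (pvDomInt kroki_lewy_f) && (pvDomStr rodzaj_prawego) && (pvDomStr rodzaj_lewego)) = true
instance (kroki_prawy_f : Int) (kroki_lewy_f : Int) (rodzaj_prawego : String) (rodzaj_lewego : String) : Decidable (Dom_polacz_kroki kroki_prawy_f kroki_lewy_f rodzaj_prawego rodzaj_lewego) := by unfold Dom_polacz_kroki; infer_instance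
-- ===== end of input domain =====

-- B replaces A's flat fuel-driven state machine (range(L+R) loop + two trailing flush
-- loops) with a nested outer-right / inner-left decomposition; same cost, same output.


-- ===== SHARED FLOAT HELPERS =====
-- Both Python programs compute `interwal = kroki_lewy_f / kroki_prawy_f` (an IEEE-754
-- double) and the threshold `round(p * interwal)`.  These helpers model that exactly
-- with integers: a double is a pair (m, e) of value m * 2^e; division and the
-- int-by-double product are rounded to 53 significant bits with round-half-to-even,
-- and pvRoundD is Python's round() (nearest integer, half to even).  Exact on the
-- domain |int| ≤ 2^31 (no overflow/underflow/subnormals are reachable there).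

-- round-half-to-even of a / b, for b > 0
def pvRNE (a b : Int) : Int :=
  let q := Int.fdiv a b
  let r := a - q * b
  if 2 * r < b then q
  else if b < 2 * r then q + 1
  else if q % 2 = 0 then q else q + 1

-- nearest double to a / b (b ≠ 0), as (m, e)
def pvDivD (a b : Int) : Int × Int :=
  if a = 0 then (0, 0)
  else
    let s : Int := if (0 < a) = (0 < b) then 1 else -1
    let n : Nat := a.natAbs * 2 ^ 200
    let q : Nat := n / b.natAbs
    let r : Nat := n % b.natAbs
    let drop : Nat := Nat.log2 q + 1 - 53
    let qq : Nat := q / 2 ^ drop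
    let rem : Nat := q % 2 ^ drop
    let half : Nat := 2 ^ (drop - 1)
    let m : Nat :=
      if rem < half then qq
      else if half < rem then qq + 1
      else if r ≠ 0 then qq + 1
      else if qq % 2 = 0 then qq else qq + 1
    (s * (m : Int), (drop : Int) - 200)

-- round t * 2^e to a double (53-bit significand, half to even)
def pvFit53 (t e : Int) : Int × Int :=
  if t.natAbs < 2 ^ 53 then (t, e)
  else
    let drop : Nat := Nat.log2 t.natAbs + 1 - 53
    (pvRNE t (2 ^ drop), e + (drop : Int))

-- Python round() of the double (m, e)
def pvRoundD (m e : Int) : Int :=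
  if 0 ≤ e then m * 2 ^ e.toNat else pvRNE m (2 ^ (-e).toNat)

-- round(p * interwal) for an int p and the double interwal
def pvRoundMul (p : Int) (intw : Int × Int) : Int :=
  let f := pvFit53 (p * intw.1) intw.2
  pvRoundD f.1 f.2

-- ===== PORT A =====
-- `while indeks_prawy < kroki_prawy_f: polaczone.append(rodzaj_prawego); indeks_prawy += 1`
def pvWhileR (R : Int) (rp : String) (prawy : Int) (acc : List String) : List String :=
  if prawy < R then pvWhileR R rp (prawy + 1) (acc ++ [rp]) else acc
termination_by (R - prawy).toNat
decreasing_by omega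

-- `while indeks_lewy < kroki_lewy_f: polaczone.append(rodzaj_lewego); indeks_lewy += 1`
def pvWhileL (L : Int) (rl : String) (lewy : Int) (acc : List String) : List String :=
  if lewy < L then pvWhileL L rl (lewy + 1) (acc ++ [rl]) else acc
termination_by (L - lewy).toNat
decreasing_by omega

-- the `for i in range(laczna_dlugosc)` state machine; fuel = number of iterations left
def pvForA (L R : Int) (rp rl : String) (intw : Int × Int) :
    Nat → Int → Int → List String → Int × Int × List String
  | 0, lewy, prawy, acc => (lewy, prawy, acc)
  | n + 1, lewy, prawy, acc =>
    if lewy < pvRoundMul prawy intw ∧ lewy < L then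
      pvForA L R rp rl intw n (lewy + 1) prawy (acc ++ [rl])
    else if prawy < R then
      pvForA L R rp rl intw n lewy (prawy + 1) (acc ++ [rp])
    else
      pvForA L R rp rl intw n lewy prawy acc

def polacz_kroki (kroki_prawy_f : Int) (kroki_lewy_f : Int) (rodzaj_prawego : String) (rodzaj_lewego : String) : List String :=
  let laczna := kroki_prawy_f + kroki_lewy_f
  let interwal := pvDivD kroki_lewy_f kroki_prawy_f
  let s := pvForA kroki_lewy_f kroki_prawy_f rodzaj_prawego rodzaj_lewego interwal laczna.toNat 0 0 []
  pvWhileL kroki_lewy_f rodzaj_lewego s.1 (pvWhileR kroki_prawy_f rodzaj_prawego s.2.1 s.2.2)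

-- ===== PORT B =====
-- `while lewy < round(p * interwal) and lewy < kroki_lewy_f: append(rodzaj_lewego); lewy += 1`
def pvInner (L : Int) (th : Int) (rl : String) (lewy : Int) (acc : List String) : Int × List String :=
  if lewy < th ∧ lewy < L then pvInner L th rl (lewy + 1) (acc ++ [rl]) else (lewy, acc)
termination_by (L - lewy).toNat
decreasing_by omega

-- `for p in range(kroki_prawy_f)` of B; fuel = iterations left, p the loop variable
def pvForB (L : Int) (rp rl : String) (intw : Int × Int) :
    Nat → Int → Int → List String → Int × List String
  | 0, _, lewy, acc => (lewy, acc)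
  | n + 1, p, lewy, acc =>
    let s := pvInner L (pvRoundMul p intw) rl lewy acc
    pvForB L rp rl intw n (p + 1) s.1 (s.2 ++ [rp])

def polacz_kroki_alt (kroki_prawy_f : Int) (kroki_lewy_f : Int) (rodzaj_prawego : String) (rodzaj_lewego : String) : List String :=
  let interwal := pvDivD kroki_lewy_f kroki_prawy_f
  let s := pvForB kroki_lewy_f rodzaj_prawego rodzaj_lewego interwal kroki_prawy_f.toNat 0 0 []
  pvWhileL kroki_lewy_f rodzaj_lewego s.1 s.2

-- ===== PRECONDITION & SPEC =====
-- Pre_ excludes only kroki_prawy_f = 0, where both programs raise ZeroDivisionError.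
def Pre_polacz_kroki (kroki_prawy_f : Int) (kroki_lewy_f : Int) (rodzaj_prawego : String) (rodzaj_lewego : String) : Prop := kroki_prawy_f ≠ 0
instance (kroki_prawy_f : Int) (kroki_lewy_f : Int) (rodzaj_prawego : String) (rodzaj_lewego : String) : Decidable (Pre_polacz_kroki kroki_prawy_f kroki_lewy_f rodzaj_prawego rodzaj_lewego) := by unfold Pre_polacz_kroki; infer_instance
def pvWitness_polacz_kroki : Int × Int × String × String := (2, 3, "P", "L")

def Spec_polacz_kroki (kroki_prawy_f : Int) (kroki_lewy_f : Int) (rodzaj_prawego : String) (rodzaj_lewego : String) (out : List String) : Prop := out = polacz_kroki_alt kroki_prawy_f kroki_lewy_f rodzaj_prawego rodzaj_lewego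
instance (kroki_prawy_f : Int) (kroki_lewy_f : Int) (rodzaj_prawego : String) (rodzaj_lewego : String) (out : List String) : Decidable (Spec_polacz_kroki kroki_prawy_f kroki_lewy_f rodzaj_prawego rodzaj_lewego out) := by unfold Spec_polacz_kroki; infer_instance

-- ===== CLAIM (what is proved, stated in full; the proofs are below) =====
def Claim_equal_polacz_kroki : Prop := ∀ (kroki_prawy_f : Int) (kroki_lewy_f : Int) (rodzaj_prawego : String) (rodzaj_lewego : String), Dom_polacz_kroki kroki_prawy_f kroki_lewy_f rodzaj_prawego rodzaj_lewego → Pre_polacz_kroki kroki_prawy_f kroki_lewy_f rodzaj_prawego rodzaj_lewego → Spec_polacz_kroki kroki_prawy_f kroki_lewy_f rodzaj_prawego rodzaj_lewego (polacz_kroki kroki_prawy_f kroki_lewy_f rodzaj_prawego rodzaj_lewego)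

-- ===== LEMMAS AND PROOFS =====

theorem pvWitness_ok : Dom_polacz_kroki pvWitness_polacz_kroki.1 pvWitness_polacz_kroki.2.1 pvWitness_polacz_kroki.2.2.1 pvWitness_polacz_kroki.2.2.2 ∧ Pre_polacz_kroki pvWitness_polacz_kroki.1 pvWitness_polacz_kroki.2.1 pvWitness_polacz_kroki.2.2.1 pvWitness_polacz_kroki.2.2.2 := by
  constructor <;> decide

theorem pvWhileR_spec (R : Int) (rp : String) (prawy : Int) (acc : List String) :
    pvWhileR R rp prawy acc = acc ++ List.replicate (R - prawy).toNat rp := by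
  fun_induction pvWhileR R rp prawy acc with
  | case1 prawy acc h ih =>
    rw [ih]
    have : (R - prawy).toNat = (R - (prawy + 1)).toNat + 1 := by omega
    rw [this, List.replicate_succ]
    simp
  | case2 prawy acc h =>
    have : (R - prawy).toNat = 0 := by omega
    simp [this]

theorem pvWhileL_spec (L : Int) (rl : String) (lewy : Int) (acc : List String) :
    pvWhileL L rl lewy acc = acc ++ List.replicate (L - lewy).toNat rl := by
  fun_induction pvWhileL L rl lewy acc with
  | case1 lewy acc h ih =>
    rw [ih]
    have : (L - lewy).toNat = (L - (lewy + 1)).toNat + 1 := by omega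
    rw [this, List.replicate_succ]
    simp
  | case2 lewy acc h =>
    have : (L - lewy).toNat = 0 := by omega
    simp [this]

theorem pvInner_spec (L th : Int) (rl : String) (lewy : Int) (acc : List String) :
    pvInner L th rl lewy acc =
      (max lewy (min th L), acc ++ List.replicate (max lewy (min th L) - lewy).toNat rl) := by
  fun_induction pvInner L th rl lewy acc with
  | case1 lewy acc h ih =>
    rw [ih]
    have h1 : max (lewy + 1) (min th L) = max lewy (min th L) := by omega
    have h2 : (max lewy (min th L) - lewy).toNat
        = (max (lewy + 1) (min th L) - (lewy + 1)).toNat + 1 := by omega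
    rw [h1] at *
    rw [h2, List.replicate_succ]
    simp
  | case2 lewy acc h =>
    have h1 : max lewy (min th L) = lewy := by omega
    simp [h1]

theorem pvForA_noop (L R : Int) (rp rl : String) (intw : Int × Int) (n : Nat)
    (lewy prawy : Int) (acc : List String)
    (h1 : ¬(lewy < pvRoundMul prawy intw ∧ lewy < L)) (h2 : ¬prawy < R) :
    pvForA L R rp rl intw n lewy prawy acc = (lewy, prawy, acc) := by
  induction n with
  | zero => rfl
  | succ n ih => rw [pvForA, if_neg h1, if_neg h2, ih]

theorem pvRoundMul_zero (intw : Int × Int) : pvRoundMul 0 intw = 0 := by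
  obtain ⟨m, e⟩ := intw
  have hpos : (0 : Int) < 2 ^ (-e).toNat := by positivity
  simp only [pvRoundMul, pvFit53, pvRoundD, pvRNE]
  norm_num

-- A's loop once prawy has reached R: it emits lefts up to min (round(R·intw)) L, then no-ops
theorem pvForA_tail (L R : Int) (rp rl : String) (intw : Int × Int) (k : Nat) :
    ∀ (lewy : Int) (acc : List String),
      (min (pvRoundMul R intw) L - lewy).toNat ≤ k →
      pvForA L R rp rl intw k lewy R acc =
        (max lewy (min (pvRoundMul R intw) L), R,
          acc ++ List.replicate (max lewy (min (pvRoundMul R intw) L) - lewy).toNat rl) := by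
  induction k with
  | zero =>
    intro lewy acc hk
    have h1 : max lewy (min (pvRoundMul R intw) L) = lewy := by omega
    simp [pvForA, h1]
  | succ k ih =>
    intro lewy acc hk
    by_cases hc : lewy < pvRoundMul R intw ∧ lewy < L
    · rw [pvForA, if_pos hc, ih (lewy + 1) _ (by omega)]
      have h1 : max (lewy + 1) (min (pvRoundMul R intw) L) = max lewy (min (pvRoundMul R intw) L) := by omega
      have h2 : (max lewy (min (pvRoundMul R intw) L) - lewy).toNat
          = (max (lewy + 1) (min (pvRoundMul R intw) L) - (lewy + 1)).toNat + 1 := by omega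
      rw [h1] at *
      rw [h2, List.replicate_succ]
      simp
    · rw [pvForA_noop _ _ _ _ _ _ _ _ _ hc (by omega)]
      have h1 : max lewy (min (pvRoundMul R intw) L) = lewy := by omega
      simp [h1]

-- A's loop at a state with prawy < R: it emits the inner-left block then one right step
theorem pvForA_leftrun (L R : Int) (rp rl : String) (intw : Int × Int)
    (prawy : Int) (hpr : prawy < R) (k : Nat) :
    ∀ (lewy : Int) (acc : List String), lewy ≤ L →
      k = (L + R - lewy - prawy).toNat →
      pvForA L R rp rl intw k lewy prawy acc =
        pvForA L R rp rl intw ((L + R - max lewy (min (pvRoundMul prawy intw) L) - (prawy + 1)).toNat)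
          (max lewy (min (pvRoundMul prawy intw) L)) (prawy + 1)
          (acc ++ List.replicate (max lewy (min (pvRoundMul prawy intw) L) - lewy).toNat rl ++ [rp]) := by
  induction k with
  | zero => intro lewy acc hL hk; omega
  | succ k ih =>
    intro lewy acc hL hk
    by_cases hc : lewy < pvRoundMul prawy intw ∧ lewy < L
    · rw [pvForA, if_pos hc, ih (lewy + 1) _ (by omega) (by omega)]
      have h1 : max (lewy + 1) (min (pvRoundMul prawy intw) L) = max lewy (min (pvRoundMul prawy intw) L) := by omega
      have h2 : (max lewy (min (pvRoundMul prawy intw) L) - lewy).toNat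
          = (max (lewy + 1) (min (pvRoundMul prawy intw) L) - (lewy + 1)).toNat + 1 := by omega
      rw [h1] at *
      rw [h2, List.replicate_succ]
      simp
    · rw [pvForA, if_neg hc, if_pos hpr]
      have h1 : max lewy (min (pvRoundMul prawy intw) L) = lewy := by omega
      have h2 : k = (L + R - lewy - (prawy + 1)).toNat := by omega
      rw [h1, h2]
      simp

-- B's running left counter never exceeds L
theorem pvForB_le (L : Int) (rp rl : String) (intw : Int × Int) (n : Nat) :
    ∀ (p lewy : Int) (acc : List String), lewy ≤ L →
      (pvForB L rp rl intw n p lewy acc).1 ≤ L ∧ lewy ≤ (pvForB L rp rl intw n p lewy acc).1 := by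
  induction n with
  | zero => intro p lewy acc h; exact ⟨h, le_refl _⟩
  | succ n ih =>
    intro p lewy acc h
    rw [pvForB]
    simp only [pvInner_spec]
    have := ih (p + 1) (max lewy (min (pvRoundMul p intw) L))
      ((acc ++ List.replicate (max lewy (min (pvRoundMul p intw) L) - lewy).toNat rl) ++ [rp])
      (by omega)
    exact ⟨this.1, le_trans (by omega) this.2⟩

-- the bridge: A's for-loop, given exactly its remaining fuel, simulates B's remaining
-- blocks and then A's trailing left run at prawy = R
theorem pvForA_bridge (L R : Int) (rp rl : String) (intw : Int × Int) (n : Nat) :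
    ∀ (prawy lewy : Int) (acc : List String),
      prawy ≤ R → lewy ≤ L → n = (R - prawy).toNat →
      pvForA L R rp rl intw ((L + R - lewy - prawy).toNat) lewy prawy acc =
        (max (pvForB L rp rl intw n prawy lewy acc).1 (min (pvRoundMul R intw) L), R,
          (pvForB L rp rl intw n prawy lewy acc).2 ++
            List.replicate (max (pvForB L rp rl intw n prawy lewy acc).1 (min (pvRoundMul R intw) L)
              - (pvForB L rp rl intw n prawy lewy acc).1).toNat rl) := by
  induction n with
  | zero =>
    intro prawy lewy acc hpR hlL hn
    have hpr : prawy = R := by omega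
    subst hpr
    rw [pvForA_tail _ _ _ _ _ _ _ _ (by omega)]
    rfl
  | succ n ih =>
    intro prawy lewy acc hpR hlL hn
    have hpr : prawy < R := by omega
    rw [pvForA_leftrun L R rp rl intw prawy hpr _ lewy acc hlL rfl]
    rw [ih (prawy + 1) (max lewy (min (pvRoundMul prawy intw) L))
      ((acc ++ List.replicate (max lewy (min (pvRoundMul prawy intw) L) - lewy).toNat rl) ++ [rp])
      (by omega) (by omega) (by omega)]
    rw [pvForB]
    simp only [pvInner_spec]

-- A's for-loop when kroki_lewy_f ≤ 0: only right steps happen, bounded by fuel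
theorem pvForA_rights (L R : Int) (rp rl : String) (intw : Int × Int) (hL : L ≤ 0) (k : Nat) :
    ∀ (prawy : Int) (acc : List String),
      pvForA L R rp rl intw k 0 prawy acc =
        (0, prawy + (min k (R - prawy).toNat : Nat),
          acc ++ List.replicate (min k (R - prawy).toNat) rp) := by
  induction k with
  | zero => intro prawy acc; simp [pvForA]
  | succ k ih =>
    intro prawy acc
    have hc : ¬((0 : Int) < pvRoundMul prawy intw ∧ (0 : Int) < L) := by
      rintro ⟨-, h⟩; omega
    by_cases hpr : prawy < R
    · rw [pvForA, if_neg hc, if_pos hpr, ih]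
      have h1 : min (k + 1) (R - prawy).toNat = min k (R - (prawy + 1)).toNat + 1 := by omega
      have h2 : prawy + 1 + ((min k (R - (prawy + 1)).toNat : Nat) : Int)
          = prawy + ((min (k + 1) (R - prawy).toNat : Nat) : Int) := by omega
      rw [h2, h1, List.replicate_succ]
      simp
    · rw [pvForA_noop _ _ _ _ _ _ _ _ _ hc hpr]
      have h1 : min (k + 1) (R - prawy).toNat = 0 := by omega
      simp [h1]

-- B's for-loop when kroki_lewy_f ≤ 0: the inner while never fires
theorem pvForB_rights (L : Int) (rp rl : String) (intw : Int × Int) (hL : L ≤ 0) (n : Nat) :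
    ∀ (p : Int) (acc : List String),
      pvForB L rp rl intw n p 0 acc = (0, acc ++ List.replicate n rp) := by
  induction n with
  | zero => intro p acc; simp [pvForB]
  | succ n ih =>
    intro p acc
    rw [pvForB]
    simp only [pvInner_spec]
    have h1 : max (0 : Int) (min (pvRoundMul p intw) L) = 0 := by omega
    rw [h1]
    rw [ih]
    have h2 : ((0 : Int) - 0).toNat = 0 := by omega
    rw [h2, List.replicate_succ]
    simp

-- ===== VERDICT (by name: the statement is the Claim_ definition above) =====
theorem polacz_kroki_spec : Claim_equal_polacz_kroki := by
  intro R L rp rl _hDom hPre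
  unfold Spec_polacz_kroki polacz_kroki polacz_kroki_alt
  simp only []
  by_cases hL : L ≤ 0
  · -- no left steps at all: both produce R.toNat rights
    rw [pvForA_rights L R rp rl _ hL]
    rw [pvForB_rights L rp rl _ hL]
    rw [pvWhileR_spec, pvWhileL_spec, pvWhileL_spec]
    have h1 : (L - 0).toNat = 0 := by omega
    rw [h1]
    have h2 : min (R + L).toNat (R - 0).toNat + (R - (0 + ((min (R + L).toNat (R - 0).toNat : Nat) : Int))).toNat
        = R.toNat := by omega
    simp only [← List.replicate_add, List.replicate_zero,
      List.append_nil, List.nil_append]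
    rw [h2]
  · push_neg at hL
    by_cases hR : R < 0
    · -- negative right count: A's loop and B's loop both do nothing; lefts flushed
      have hc : ¬((0 : Int) < pvRoundMul 0 (pvDivD L R) ∧ (0 : Int) < L) := by
        rw [pvRoundMul_zero]; rintro ⟨h, -⟩; omega
      have hno : ¬ (0 : Int) < R := by omega
      rw [pvForA_noop L R rp rl (pvDivD L R) (R + L).toNat 0 0 [] hc hno]
      have hRn : R.toNat = 0 := by omega
      rw [hRn]
      rw [pvWhileR_spec, pvWhileL_spec, pvWhileL_spec]
      have h1 : (R - 0).toNat = 0 := by omega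
      simp [pvForB, hRn]
    · -- main case: 0 < R (R ≠ 0 by Pre_), 0 < L
      push_neg at hR
      have hR0 : 0 < R := lt_of_le_of_ne hR (Ne.symm hPre)
      have hfuel : (R + L).toNat = (L + R - 0 - 0).toNat := by omega
      rw [hfuel, pvForA_bridge L R rp rl (pvDivD L R) R.toNat 0 0 [] (by omega) (by omega) (by omega)]
      rw [pvWhileR_spec, pvWhileL_spec, pvWhileL_spec]
      have hle := pvForB_le L rp rl (pvDivD L R) R.toNat 0 0 [] (by omega)
      set s := pvForB L rp rl (pvDivD L R) R.toNat 0 0 [] with hs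
      have h1 : (R - R).toNat = 0 := by omega
      have hm : min (pvRoundMul R (pvDivD L R)) L ≤ L := by omega
      have h2 : (max s.1 (min (pvRoundMul R (pvDivD L R)) L) - s.1).toNat
          + (L - max s.1 (min (pvRoundMul R (pvDivD L R)) L)).toNat = (L - s.1).toNat := by omega
      simp only [h1, List.replicate_zero, List.append_nil, List.append_assoc,
        ← List.replicate_add]
      rw [h2]
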